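-- pv_equiv track=rewrite | github.com/shettydevesh/supermemory-testing-site | general_question_analyzer.py | is_likely_knowledge_query
-- ===== SOURCE A (Python) =====
-- def is_likely_knowledge_query(query: str) -> bool:
--     """
--     Additional check: Does the query contain knowledge-seeking indicators?
--     Can be used as a secondary filter.
--
--     Args:
--         query: The user's input query
--
--     Returns:
--         True if query contains knowledge-seeking keywords
--     """
--     if not query:
--         return False
--
--     knowledge_indicators = {
--         'what', 'when', 'where', 'why', 'how', 'who', 'which',
--         'explain', 'describe', 'tell me', 'find', 'search',
--         'show', 'list', 'get', 'give', 'provide', 'details',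
--         'information', 'about', 'regarding', 'concerning'
--     }
--
--     query_lower = query.lower()
--     return any(indicator in query_lower for indicator in knowledge_indicators)
-- ===== SOURCE B (Python) =====
-- KNOWLEDGE_INDICATORS = (
--     'what', 'when', 'where', 'why', 'how', 'who', 'which',
--     'explain', 'describe', 'tell me', 'find', 'search',
--     'show', 'list', 'get', 'give', 'provide', 'details',
--     'information', 'about', 'regarding', 'concerning',
-- )
--
-- def is_likely_knowledge_query(query: str) -> bool:
--     # Single left-to-right pass over the lowered query: at each position,
--     # does one of the indicators start here?  (position-major scan instead of
--     # A's keyword-major repeated substring searches)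
--     ql = query.lower()
--     return any(ql.startswith(kw, i)
--                for i in range(len(ql))
--                for kw in KNOWLEDGE_INDICATORS)
-- ===== Notes on version B (the rewrite author's own statement) =====
-- stated objective: alternative
-- what changed: Replaces A's keyword-major check (one full substring search of the query per indicator) with a single position-major left-to-right pass over the lowered query that tests at each position whether any indicator starts there.
import Mathlib
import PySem

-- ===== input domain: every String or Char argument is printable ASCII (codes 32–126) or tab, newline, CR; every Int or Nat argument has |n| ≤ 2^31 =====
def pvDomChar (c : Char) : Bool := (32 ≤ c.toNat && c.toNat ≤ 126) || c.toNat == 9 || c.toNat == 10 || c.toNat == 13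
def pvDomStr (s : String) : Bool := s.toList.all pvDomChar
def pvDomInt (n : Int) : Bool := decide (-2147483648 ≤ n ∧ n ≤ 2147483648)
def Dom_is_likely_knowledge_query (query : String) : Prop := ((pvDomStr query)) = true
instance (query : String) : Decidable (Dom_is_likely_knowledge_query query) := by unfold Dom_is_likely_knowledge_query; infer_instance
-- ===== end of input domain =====

-- B replaces A's keyword-major repeated substring searches with a single
-- position-major left-to-right scan of the lowered query (objective: alternative).


-- ===== PORT A =====
-- the set literal of A, in source order (all elements distinct)
def pvIndicators : List String :=
  ["what", "when", "where", "why", "how", "who", "which",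
   "explain", "describe", "tell me", "find", "search",
   "show", "list", "get", "give", "provide", "details",
   "information", "about", "regarding", "concerning"]

def is_likely_knowledge_query (query : String) : Bool :=
  if query == "" then false
  else
    let query_lower := PySem.Str.lower query
    pvIndicators.any (fun indicator => PySem.Str.isIn indicator query_lower)

-- ===== PORT B =====
-- B's indicator tuple, as lists of characters (B scans characterwise)
def pvIndicatorsChars : List (List Char) := pvIndicators.map String.toList

-- B's generator 'any(ql.startswith(kw, i) for i in range(len(ql)) for kw in ...)':
-- one pass over the positions of the lowered query, testing each indicator at that position
def pvAltScan (cs : List Char) : Bool :=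
  match cs with
  | [] => false
  | _ :: rest =>
      if pvIndicatorsChars.any (fun kw => PySem.Chars.startswith cs kw) then true
      else pvAltScan rest

def is_likely_knowledge_query_alt (query : String) : Bool :=
  pvAltScan (PySem.Str.lower query).toList

-- ===== PRECONDITION & SPEC =====
def Spec_is_likely_knowledge_query (query : String) (out : Bool) : Prop := out = is_likely_knowledge_query_alt query
instance (query : String) (out : Bool) : Decidable (Spec_is_likely_knowledge_query query out) := by unfold Spec_is_likely_knowledge_query; infer_instance

-- ===== CLAIM (what is proved, stated in full; the proofs are below) =====
def Claim_equal_is_likely_knowledge_query : Prop := ∀ (query : String), Dom_is_likely_knowledge_query query → Spec_is_likely_knowledge_query query (is_likely_knowledge_query query)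

-- ===== LEMMAS AND PROOFS =====

-- no indicator is the empty string
-- the position-major scan finds exactly the indicators occurring as infixes
theorem pvAltScan_eq_true_iff (cs : List Char) :
    pvAltScan cs = true ↔ ∃ kw ∈ pvIndicatorsChars, kw <:+: cs := by
  induction cs with
  | nil => decide
  | cons c rest ih =>
      simp only [pvAltScan]
      by_cases h : pvIndicatorsChars.any (fun kw => PySem.Chars.startswith (c :: rest) kw) = true
      · rw [if_pos h]
        simp only [true_iff]
        rcases List.any_eq_true.mp h with ⟨kw, hkw, hsw⟩
        exact ⟨kw, hkw, ((PySem.Chars.startswith_iff _ _).mp hsw).isInfix⟩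
      · rw [if_neg h, ih]
        constructor
        · rintro ⟨kw, hkw, hinf⟩
          exact ⟨kw, hkw, hinf.trans (List.suffix_cons c rest).isInfix⟩
        · rintro ⟨kw, hkw, hinf⟩
          rcases List.infix_cons_iff.mp hinf with hpre | hinf'
          · exact absurd (List.any_eq_true.mpr ⟨kw, hkw,
              (PySem.Chars.startswith_iff _ _).mpr hpre⟩) h
          · exact ⟨kw, hkw, hinf'⟩

-- A's keyword-major check agrees with the scan on the same lowered characters
theorem pv_keyword_major_iff (cs : List Char) :
    pvIndicators.any (fun ind => PySem.Chars.isIn ind.toList cs) = true ↔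
      ∃ kw ∈ pvIndicatorsChars, kw <:+: cs := by
  rw [List.any_eq_true]
  constructor
  · rintro ⟨ind, hind, hin⟩
    exact ⟨ind.toList, List.mem_map.mpr ⟨ind, hind, rfl⟩,
      (PySem.Chars.isIn_iff_infix _ _).mp hin⟩
  · rintro ⟨kw, hkw, hinf⟩
    rcases List.mem_map.mp hkw with ⟨ind, hind, rfl⟩
    exact ⟨ind, hind, (PySem.Chars.isIn_iff_infix _ _).mpr hinf⟩

-- ===== VERDICT (by name: the statement is the Claim_ definition above) =====
theorem is_likely_knowledge_query_spec : Claim_equal_is_likely_knowledge_query := by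
  intro query _
  unfold Spec_is_likely_knowledge_query is_likely_knowledge_query is_likely_knowledge_query_alt
  by_cases hq : query = ""
  · subst hq
    decide
  · have hne : (query == "") = false := by simp [hq]
    simp only [hne]
    have hA : pvIndicators.any (fun ind => PySem.Str.isIn ind (PySem.Str.lower query)) =
        pvIndicators.any (fun ind => PySem.Chars.isIn ind.toList (PySem.Str.lower query).toList) := by
      simp [PySem.Str.isIn_eq]
    rw [hA]
    exact Bool.eq_iff_iff.mpr
      ((pv_keyword_major_iff _).trans (pvAltScan_eq_true_iff _).symm)
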